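-- pv_equiv track=rewrite | github.com/lewis6991/tcl-ls | src/tcl_lsp/checker/reporting.py | _visual_column
-- ===== SOURCE A (Python) =====
-- _TAB_SIZE = 4
--
-- def _visual_column(text: str, character: int) -> int:
--     column = 0
--     for char in text[:character]:
--         if char == '\t':
--             column += _TAB_SIZE - (column % _TAB_SIZE)
--         else:
--             column += 1
--     return column
-- ===== SOURCE B (Python) =====
-- _TAB_SIZE = 4
--
-- def _visual_column(text: str, character: int) -> int:
--     parts = text[:character].split('\t')
--     column = len(parts[0])
--     for part in parts[1:]:
--         column = (column // _TAB_SIZE + 1) * _TAB_SIZE + len(part)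
--     return column
-- ===== Notes on version B (the rewrite author's own statement) =====
-- stated objective: alternative
-- what changed: B splits the prefix on tab characters and processes each tab-free run in bulk (add its length, then snap to the next tab stop with floor-division arithmetic) instead of A's per-character loop with a modulus update.
import Mathlib
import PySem

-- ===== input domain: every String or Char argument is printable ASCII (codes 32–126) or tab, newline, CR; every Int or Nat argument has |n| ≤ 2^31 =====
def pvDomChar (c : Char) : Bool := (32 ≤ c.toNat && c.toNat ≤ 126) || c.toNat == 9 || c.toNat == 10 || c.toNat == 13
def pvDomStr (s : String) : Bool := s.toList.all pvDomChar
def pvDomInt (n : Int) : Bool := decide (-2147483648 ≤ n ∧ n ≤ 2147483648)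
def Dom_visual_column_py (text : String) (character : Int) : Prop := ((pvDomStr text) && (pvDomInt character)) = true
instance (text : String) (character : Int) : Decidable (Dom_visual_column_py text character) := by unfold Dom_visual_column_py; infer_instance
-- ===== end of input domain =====

-- B splits the tab-expanded prefix on '\t' and handles each tab-free run in bulk; same O(n) cost, different decomposition.

-- ===== PORT A =====
-- literal port of A: per-character loop over text[:character], tab snaps via modulus
def visual_column_py (text : String) (character : Int) : Int :=
  (PySem.List.slice text.toList none (some character)).foldl
    (fun column char =>
      if char = '\t' then column + (4 - PySem.Int.mod column 4) else column + 1) 0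

-- ===== PORT B =====
-- literal port of B: split on '\t', start from len(parts[0]), fold over parts[1:]
def visual_column_py_alt (text : String) (character : Int) : Int :=
  let parts := PySem.Chars.splitOn (PySem.List.slice text.toList none (some character)) ['\t']
  parts.tail.foldl
    (fun column part => (PySem.Int.floordiv column 4 + 1) * 4 + (part.length : Int))
    ((parts.headD []).length : Int)

-- ===== PRECONDITION & SPEC =====
def Spec_visual_column_py (text : String) (character : Int) (out : Int) : Prop := out = visual_column_py_alt text character
instance (text : String) (character : Int) (out : Int) : Decidable (Spec_visual_column_py text character out) := by unfold Spec_visual_column_py; infer_instance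

-- ===== CLAIM (what is proved, stated in full; the proofs are below) =====
def Claim_equal_visual_column_py : Prop := ∀ (text : String) (character : Int), Dom_visual_column_py text character → Spec_visual_column_py text character (visual_column_py text character)

-- ===== LEMMAS AND PROOFS =====

/-- reference splitter: split `l` on '\t' with accumulator `cur` (reversed current run). -/
def splitTab' (cur : List Char) : List Char → List (List Char)
  | [] => [cur.reverse]
  | c :: rest => if c = '\t' then cur.reverse :: splitTab' [] rest else splitTab' (c :: cur) rest

/-- reference column function. -/
def colRef (col : Int) : List Char → Int
  | [] => col
  | c :: rest =>
    if c = '\t' then colRef ((PySem.Int.floordiv col 4 + 1) * 4) rest else colRef (col + 1) rest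

theorem splitTab'_ne_nil (l : List Char) (cur : List Char) : splitTab' cur l ≠ [] := by
  induction l generalizing cur with
  | nil => simp [splitTab']
  | cons c rest ih => by_cases h : c = '\t' <;> simp [splitTab', h, ih]

theorem splitTab'_cur (l : List Char) (cur : List Char) :
    splitTab' cur l = (cur.reverse ++ (splitTab' [] l).headD []) :: (splitTab' [] l).tail := by
  induction l generalizing cur with
  | nil => simp [splitTab']
  | cons c rest ih =>
    by_cases h : c = '\t'
    · simp [splitTab', h]
    · simp only [splitTab', if_neg h]
      rw [ih (c :: cur), ih [c]]
      simp

theorem go_eq_splitTab' (fuel : Nat) (l cur : List Char) (acc : List (List Char))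
    (hf : l.length ≤ fuel) :
    PySem.Chars.splitOn.go ['\t'] fuel l cur acc = acc.reverse ++ splitTab' cur l := by
  induction fuel generalizing l cur acc with
  | zero =>
    match l with
    | [] => simp [PySem.Chars.splitOn.go, splitTab']
    | c :: rest => simp at hf
  | succ f ih =>
    match l with
    | [] => simp [PySem.Chars.splitOn.go, splitTab']
    | c :: rest =>
      simp only [PySem.Chars.splitOn.go]
      by_cases h : c = '\t'
      · rw [if_pos (by simp [h, List.isPrefixOf])]
        rw [show List.drop ['\t'].length (c :: rest) = rest from rfl]
        rw [ih rest [] (cur.reverse :: acc) (by simpa using Nat.le_of_succ_le_succ hf)]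
        simp [splitTab', h]
      · rw [if_neg (by simp [List.isPrefixOf]; exact fun hc => h hc.symm)]
        rw [ih rest (c :: cur) acc (by simpa using Nat.le_of_succ_le_succ hf)]
        simp [splitTab', h]

theorem splitOn_eq_splitTab' (l : List Char) :
    PySem.Chars.splitOn l ['\t'] = splitTab' [] l := by
  show PySem.Chars.splitOn.go ['\t'] (l.length + 1) l [] [] = _
  rw [go_eq_splitTab' (l.length + 1) l [] [] (by omega)]; rfl

theorem foldB_eq_colRef (l : List Char) (col : Int) :
    (splitTab' [] l).tail.foldl
      (fun column part => (PySem.Int.floordiv column 4 + 1) * 4 + (part.length : Int))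
      (col + ((splitTab' [] l).headD []).length) = colRef col l := by
  induction l generalizing col with
  | nil => simp [splitTab', colRef]
  | cons c rest ih =>
    by_cases h : c = '\t'
    · simp only [splitTab', h, colRef, List.reverse_nil]
      obtain ⟨hd, tl, heq⟩ : ∃ hd tl, splitTab' ([] : List Char) rest = hd :: tl := by
        cases hrec : splitTab' ([] : List Char) rest with
        | nil => exact absurd hrec (splitTab'_ne_nil rest [])
        | cons hd tl => exact ⟨hd, tl, rfl⟩
      have := ih ((PySem.Int.floordiv (col + 0) 4 + 1) * 4)
      rw [heq] at this ⊢
      simpa using this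
    · simp only [splitTab', if_neg h, colRef]
      rw [splitTab'_cur rest [c]]
      have := ih (col + 1)
      cases hrec : splitTab' ([] : List Char) rest with
      | nil => exact absurd hrec (splitTab'_ne_nil rest [])
      | cons hd tl =>
        rw [hrec] at this
        simp only [List.headD_cons, List.tail_cons] at this ⊢
        rw [← this]
        have hlen : (col + (([c].reverse ++ hd).length : Int)) = col + 1 + (hd.length : Int) := by
          simp; ring
        rw [hlen]

theorem foldA_eq_colRef (l : List Char) (col : Int) (hcol : 0 ≤ col) :
    l.foldl (fun column char =>
      if char = '\t' then column + (4 - PySem.Int.mod column 4) else column + 1) col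
    = colRef col l := by
  induction l generalizing col with
  | nil => simp [colRef]
  | cons c rest ih =>
    by_cases h : c = '\t'
    · simp only [List.foldl_cons, h, colRef, if_pos]
      rw [PySem.Int.mod_eq_emod_of_pos (by norm_num),
          PySem.Int.floordiv_eq_ediv_of_pos (by norm_num)]
      have harith : col + (4 - col % 4) = (col / 4 + 1) * 4 := by omega
      rw [harith]
      exact ih _ (by positivity)
    · simp only [List.foldl_cons, if_neg h, colRef]
      exact ih _ (by omega)

-- ===== VERDICT (by name: the statement is the Claim_ definition above) =====
theorem visual_column_py_spec : Claim_equal_visual_column_py := by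
  intro text character _
  unfold Spec_visual_column_py visual_column_py visual_column_py_alt
  rw [splitOn_eq_splitTab']
  rw [foldA_eq_colRef _ 0 le_rfl, ← foldB_eq_colRef]
  simp
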